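-- pv_equiv track=rewrite | github.com/uchiha-vivek-web/2025-DSA | dsa/HashMap/RepetitiveElement.py | RepetitiveElement
-- ===== SOURCE A (Python) =====
-- def RepetitiveElement(nums:list[int]):
--     hash_map ={}
--     for num in nums :
--         if num in hash_map:
--             hash_map[num] +=1
--         else :
--             hash_map[num]=0
--     for num in nums :
--         if hash_map[num]==1 :
--             return num
--     return None
-- ===== SOURCE B (Python) =====
-- def RepetitiveElement(nums: list[int]):
--     # sort-then-scan: run lengths in the sorted copy are the multiplicities
--     twice = set()
--     run_val = None
--     run_len = 0
--     for x in sorted(nums):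
--         if x == run_val:
--             run_len += 1
--         else:
--             if run_len == 2:
--                 twice.add(run_val)
--             run_val = x
--             run_len = 1
--     if run_len == 2:
--         twice.add(run_val)
--     for x in nums:
--         if x in twice:
--             return x
--     return None
-- ===== Notes on version B (the rewrite author's own statement) =====
-- stated objective: alternative
-- what changed: Replaces the hash-map counting entirely by sort-then-scan: sort the list, collect via one run-length pass the set of values whose run is exactly 2, then return the first element of the original list belonging to that set.
import Mathlib
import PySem

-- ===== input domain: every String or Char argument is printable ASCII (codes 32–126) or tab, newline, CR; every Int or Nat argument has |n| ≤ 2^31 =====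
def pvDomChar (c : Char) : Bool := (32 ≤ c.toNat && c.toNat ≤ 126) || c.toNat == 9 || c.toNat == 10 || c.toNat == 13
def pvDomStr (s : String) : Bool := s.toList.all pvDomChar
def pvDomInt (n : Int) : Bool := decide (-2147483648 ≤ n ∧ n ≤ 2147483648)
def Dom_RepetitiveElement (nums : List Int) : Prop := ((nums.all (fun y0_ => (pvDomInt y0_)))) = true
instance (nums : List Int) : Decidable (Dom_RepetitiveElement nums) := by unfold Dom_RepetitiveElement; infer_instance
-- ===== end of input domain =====

-- B replaces A's hash-map counting by sort-then-scan: one run-length pass over sorted(nums)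
-- yields the set of values occurring exactly twice, then the first element of nums in that set is returned.

-- ===== PORT A =====
-- first loop: build hash_map (value = occurrences seen so far minus one)
def pvStepA (d : PySem.Dict Int Int) (num : Int) : PySem.Dict Int Int :=
  if d.contains num then d.modify num 0 (· + 1) else d.insert num 0

def RepetitiveElement (nums : List Int) : Option Int :=
  let hash_map := nums.foldl pvStepA PySem.Dict.empty
  -- second loop: every num ∈ nums is a key of hash_map, so getD is exact for A's hash_map[num]
  nums.find? (fun num => hash_map.getD num 0 == 1)

-- ===== PORT B =====
-- loop body over sorted(nums); state = (twice, run_val, run_len); 'x == run_val' with run_val = None is False in Python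
def pvLoopB (st : PySem.Set Int × Option Int × Int) (x : Int) :
    PySem.Set Int × Option Int × Int :=
  let (twice, run_val, run_len) := st
  if some x == run_val then (twice, run_val, run_len + 1)
  else
    let twice :=
      if run_len == 2 then
        match run_val with
        | some v => twice.add v
        | none => twice        -- unreachable: run_len == 2 implies run_val is set
      else twice
    (twice, some x, 1)

-- the trailing 'if run_len == 2: twice.add(run_val)' after the loop
def pvCloseB (st : PySem.Set Int × Option Int × Int) : PySem.Set Int :=
  if st.2.2 == 2 then
    match st.2.1 with
    | some v => st.1.add v
    | none => st.1
  else st.1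

def RepetitiveElement_alt (nums : List Int) : Option Int :=
  let twice :=
    pvCloseB ((PySem.List.sorted nums (fun x => x) false).foldl pvLoopB
      (PySem.Set.empty, none, 0))
  nums.find? (fun x => twice.contains x)

-- ===== PRECONDITION & SPEC =====
def Spec_RepetitiveElement (nums : List Int) (out : Option Int) : Prop := out = RepetitiveElement_alt nums
instance (nums : List Int) (out : Option Int) : Decidable (Spec_RepetitiveElement nums out) := by unfold Spec_RepetitiveElement; infer_instance

-- ===== CLAIM =====
def Claim_equal_RepetitiveElement : Prop := ∀ (nums : List Int), Dom_RepetitiveElement nums → Spec_RepetitiveElement nums (RepetitiveElement nums)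

-- ===== LEMMAS AND PROOFS =====

theorem pvStepA_get? (d : PySem.Dict Int Int) (x v : Int) :
    (pvStepA d x).get? v =
      if v = x then some (((d.get? x).getD (-1)) + 1) else d.get? v := by
  unfold pvStepA
  by_cases hc : d.contains x
  · simp only [hc, if_true, PySem.Dict.modify, PySem.Dict.get?_insert]
    rcases h : d.get? x with _ | c
    · rw [PySem.Dict.contains_eq_isSome_get?, h] at hc; simp at hc
    · simp [PySem.Dict.getD_eq_get?_getD, h]
  · rw [Bool.not_eq_true] at hc
    have h : d.get? x = none := by
      rw [PySem.Dict.contains_eq_isSome_get?] at hc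
      exact Option.not_isSome_iff_eq_none.mp (by simp [hc])
    simp [hc, PySem.Dict.get?_insert, h]

theorem pvBuildA_get? (l : List Int) (d : PySem.Dict Int Int) (v : Int) :
    (l.foldl pvStepA d).get? v =
      match d.get? v with
      | some c => some (c + l.count v)
      | none => if v ∈ l then some ((l.count v : Int) - 1) else none := by
  induction l generalizing d with
  | nil => rcases h : d.get? v with _ | c <;> simp [h]
  | cons x xs ih =>
    simp only [List.foldl_cons, ih, pvStepA_get?]
    by_cases hvx : v = x
    · subst hvx
      rcases h : d.get? v with _ | c <;>
        simp only [List.count_cons_self, List.mem_cons, true_or, if_true,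
          Option.getD_none, Option.getD_some] <;>
        · congr 1; push_cast; omega
    · have hxv : ¬ x = v := fun h' => hvx h'.symm
      rcases h : d.get? v with _ | c <;> simp [hvx, hxv]

theorem pv_find?_congr {α : Type} (l : List α) (p q : α → Bool)
    (h : ∀ x ∈ l, p x = q x) : l.find? p = l.find? q := by
  induction l with
  | nil => rfl
  | cons x xs ih =>
    simp only [List.find?_cons, h x (by simp)]
    cases q x
    · exact ih (fun y hy => h y (by simp [hy]))
    · rfl

-- count over a cons with a different head
theorem pvCountConsNe {u x : Int} (rest : List Int) (h : u ≠ x) :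
    (x :: rest).count u = rest.count u := by
  simp [List.count_cons]
  exact fun hh => h hh.symm

-- run-length invariant: folding pvLoopB over a sorted tail with an open run (v, k)
theorem pvLoopB_run (s : List Int) (hs : s.Pairwise (· ≤ ·))
    (tw : PySem.Set Int) (v k : Int) (hv : ∀ y ∈ s, v ≤ y) (u : Int) :
    (u ∈ pvCloseB (s.foldl pvLoopB (tw, some v, k))) ↔
      (u ∈ tw ∨ (u = v ∧ k + (s.count v : Int) = 2) ∨
        (u ≠ v ∧ u ∈ s ∧ s.count u = 2)) := by
  induction s generalizing tw v k with
  | nil =>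
    simp only [List.foldl_nil, pvCloseB, List.count_nil]
    by_cases hk : k = 2
    · simp [hk, PySem.Set.mem_add]; try tauto
    · simp [hk]; try omega
  | cons x rest ih =>
    have hvx : v ≤ x := hv x (by simp)
    have hxr : ∀ y ∈ rest, x ≤ y := fun y hy => (List.pairwise_cons.mp hs).1 y hy
    have hrest : rest.Pairwise (· ≤ ·) := (List.pairwise_cons.mp hs).2
    by_cases hxv : x = v
    · subst hxv
      simp only [List.foldl_cons, pvLoopB, beq_self_eq_true, if_true]
      rw [ih hrest tw x (k + 1) hxr]
      constructor
      · rintro (h | ⟨h1, h2⟩ | ⟨h1, h2, h3⟩)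
        · exact Or.inl h
        · refine Or.inr (Or.inl ⟨h1, ?_⟩)
          rw [List.count_cons_self]; push_cast at h2 ⊢; omega
        · refine Or.inr (Or.inr ⟨h1, List.mem_cons_of_mem _ h2, ?_⟩)
          rw [pvCountConsNe rest h1]; exact h3
      · rintro (h | ⟨h1, h2⟩ | ⟨h1, h2, h3⟩)
        · exact Or.inl h
        · refine Or.inr (Or.inl ⟨h1, ?_⟩)
          rw [List.count_cons_self] at h2; push_cast at h2 ⊢; omega
        · refine Or.inr (Or.inr ⟨h1, ?_, ?_⟩)
          · rcases List.mem_cons.mp h2 with h | h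
            · exact absurd h h1
            · exact h
          · rwa [pvCountConsNe rest h1] at h3
    · -- new run: v < x and v < every element of x :: rest
      have hvlt : v < x := lt_of_le_of_ne hvx (fun h => hxv h.symm)
      have hvall : ∀ y ∈ x :: rest, v < y := by
        intro y hy
        rcases List.mem_cons.mp hy with h | h
        · omega
        · exact lt_of_lt_of_le hvlt (hxr y h)
      have hvnot : v ∉ x :: rest := fun h => lt_irrefl v (hvall v h)
      have hcv : (x :: rest).count v = 0 := List.count_eq_zero.mpr hvnot
      have hsx : (some x == some v) = false := by simp [hxv]
      simp only [List.foldl_cons, pvLoopB, hsx, Bool.false_eq_true, if_false]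
      rw [ih hrest _ x 1 hxr]
      have htw' : ∀ w : Int,
          (w ∈ (if (k == 2) then tw.add v else tw)) ↔ (w ∈ tw ∨ (w = v ∧ k = 2)) := by
        intro w
        by_cases hk : k = 2
        · simp [hk, PySem.Set.mem_add]; try tauto
        · simp [hk]
      rw [htw' u, hcv]
      constructor
      · rintro ((h | ⟨h1, h2⟩) | ⟨h1, h2⟩ | ⟨h1, h2, h3⟩)
        · exact Or.inl h
        · exact Or.inr (Or.inl ⟨h1, by simp [h2]⟩)
        · subst h1
          refine Or.inr (Or.inr ⟨hxv, by simp, ?_⟩)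
          rw [List.count_cons_self]; omega
        · have hune : u ≠ v := by
            intro h; subst h; exact absurd (List.mem_cons_of_mem x h2) hvnot
          refine Or.inr (Or.inr ⟨hune, List.mem_cons_of_mem x h2, ?_⟩)
          rw [pvCountConsNe rest h1]; exact h3
      · rintro (h | ⟨h1, h2⟩ | ⟨h1, h2, h3⟩)
        · exact Or.inl (Or.inl h)
        · exact Or.inl (Or.inr ⟨h1, by omega⟩)
        · by_cases hux : u = x
          · subst hux
            rw [List.count_cons_self] at h3
            exact Or.inr (Or.inl ⟨rfl, by omega⟩)
          · have hur : u ∈ rest := by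
              rcases List.mem_cons.mp h2 with h | h
              · exact absurd h hux
              · exact h
            rw [pvCountConsNe rest hux] at h3
            exact Or.inr (Or.inr ⟨hux, hur, h3⟩)

-- membership in B's 'twice' set = "occurs exactly twice in nums"
theorem pvTwice_mem (nums : List Int) (u : Int) :
    (u ∈ pvCloseB ((PySem.List.sorted nums (fun x => x) false).foldl pvLoopB
        (PySem.Set.empty, none, 0))) ↔ (u ∈ nums ∧ nums.count u = 2) := by
  rcases hs : PySem.List.sorted nums (fun x => x) false with _ | ⟨y, t⟩
  · have hnil : nums = [] := (PySem.List.sorted_eq_nil_iff nums (fun x => x) false).mp hs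
    subst hnil
    simp [pvCloseB, PySem.Set.empty]
  · have hperm : (y :: t).Perm nums := hs ▸ PySem.List.sorted_perm nums (fun x => x) false
    have hpw : (y :: t).Pairwise (· ≤ ·) := by
      have := PySem.List.sorted_pairwise nums (fun x => x)
      rwa [hs] at this
    have hyt : ∀ z ∈ t, y ≤ z := fun z hz => (List.pairwise_cons.mp hpw).1 z hz
    have hstep : pvLoopB (PySem.Set.empty, none, 0) y = (PySem.Set.empty, some y, 1) := by
      simp [pvLoopB, PySem.Set.empty]
    rw [List.foldl_cons, hstep,
      pvLoopB_run t (List.pairwise_cons.mp hpw).2 PySem.Set.empty y 1 hyt u]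
    have hcount : ∀ w : Int, nums.count w = (y :: t).count w := fun w => (hperm.count_eq w).symm
    have hmem : ∀ w : Int, w ∈ nums ↔ w ∈ y :: t := fun w => hperm.mem_iff.symm
    constructor
    · rintro (h | ⟨h1, h2⟩ | ⟨h1, h2, h3⟩)
      · simp [PySem.Set.empty] at h
      · subst h1
        refine ⟨(hmem u).mpr (by simp), ?_⟩
        rw [hcount, List.count_cons_self]; omega
      · refine ⟨(hmem u).mpr (List.mem_cons_of_mem y h2), ?_⟩
        rw [hcount, pvCountConsNe t h1]; exact h3
    · rintro ⟨h1, h2⟩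
      rw [hcount] at h2
      by_cases huy : u = y
      · subst huy
        rw [List.count_cons_self] at h2
        exact Or.inr (Or.inl ⟨rfl, by omega⟩)
      · have hut : u ∈ t := by
          rcases List.mem_cons.mp ((hmem u).mp h1) with h | h
          · exact absurd h huy
          · exact h
        rw [pvCountConsNe t huy] at h2
        exact Or.inr (Or.inr ⟨huy, hut, h2⟩)

-- ===== VERDICT =====
theorem RepetitiveElement_spec : Claim_equal_RepetitiveElement := by
  intro nums _
  unfold Spec_RepetitiveElement RepetitiveElement RepetitiveElement_alt
  apply pv_find?_congr
  intro v hv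
  have hg : (nums.foldl pvStepA PySem.Dict.empty).get? v = some ((nums.count v : Int) - 1) := by
    rw [pvBuildA_get?]; simp [hv]
  rw [PySem.Dict.getD_eq_get?_getD, hg]
  simp only [Option.getD_some]
  have hB := pvTwice_mem nums v
  by_cases h2 : nums.count v = 2
  · have hm : v ∈ pvCloseB ((PySem.List.sorted nums (fun x => x) false).foldl pvLoopB
        (PySem.Set.empty, none, 0)) := hB.mpr ⟨hv, h2⟩
    have hc : (pvCloseB ((PySem.List.sorted nums (fun x => x) false).foldl pvLoopB
        (([] : PySem.Set Int), none, 0))).contains v = true := by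
      simpa [List.contains_iff_mem] using hm
    rw [show (PySem.Set.empty : PySem.Set Int) = [] from rfl, hc, h2]
    decide
  · have hm : v ∉ pvCloseB ((PySem.List.sorted nums (fun x => x) false).foldl pvLoopB
        (PySem.Set.empty, none, 0)) := fun h => h2 (hB.mp h).2
    have hc : (pvCloseB ((PySem.List.sorted nums (fun x => x) false).foldl pvLoopB
        (([] : PySem.Set Int), none, 0))).contains v = false := by
      simpa [List.contains_iff_mem] using hm
    rw [show (PySem.Set.empty : PySem.Set Int) = [] from rfl, hc]
    have hne : ¬ ((nums.count v : Int) - 1 = 1) := by omega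
    simp [hne]
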